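-- pv_equiv track=rewrite | github.com/normbernardi/code_repo | Python/Numerology/perfect_abundant_deficient.py | aliquot
-- ===== SOURCE A (Python) =====
-- def aliquot(n: int) -> [int]:
--     aliquot, divisor = 1, 2
--     while divisor * divisor < n:
--         if n % divisor == 0:
--             aliquot += divisor + (n // divisor)
--         divisor += 1
--     if divisor * divisor == n:
--         aliquot += divisor
--     return aliquot
-- ===== SOURCE B (Python) =====
-- def aliquot(n: int) -> [int]:
--     divisors = [1]
--     m, p = n, 2
--     while p * p <= m:
--         if m % p == 0:
--             pk = p
--             powers = []
--             while m % p == 0: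
--                 powers.append(pk)
--                 pk *= p
--                 m //= p
--             divisors += [d * q for d in divisors for q in powers]
--         p += 1
--     if m > 1:
--         divisors += [d * m for d in divisors]
--     return 1 + sum(d for d in divisors if 2 <= d <= n // 2)
-- ===== Notes on version B (the rewrite author's own statement) =====
-- stated objective: alternative
-- what changed: B factorizes n into prime powers and generates the whole divisor list from the factorization (products of prime powers), instead of A's trial-division pairing of each divisor d <= sqrt(n) with its cofactor n//d plus a perfect-square correction.
import Mathlib
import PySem

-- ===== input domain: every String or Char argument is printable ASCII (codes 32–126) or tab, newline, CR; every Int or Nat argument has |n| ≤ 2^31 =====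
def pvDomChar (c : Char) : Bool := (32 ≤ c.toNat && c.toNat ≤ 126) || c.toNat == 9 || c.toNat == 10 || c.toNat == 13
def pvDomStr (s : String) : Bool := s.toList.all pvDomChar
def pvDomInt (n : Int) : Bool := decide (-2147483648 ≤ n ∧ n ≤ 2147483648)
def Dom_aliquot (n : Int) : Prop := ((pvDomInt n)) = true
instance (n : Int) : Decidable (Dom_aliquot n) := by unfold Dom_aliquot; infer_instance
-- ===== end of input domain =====

-- B factorizes n into prime powers and generates the divisor list from the
-- factorization, instead of A's divisor/cofactor pairing up to sqrt(n).

-- ===== PORT A =====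
-- A's while loop: state (aliquot, divisor), branches in A's order.
def aliquotLoop (n a d : Int) : Int :=
  if h : d * d < n then
    aliquotLoop n (if PySem.Int.mod n d = 0 then a + (d + PySem.Int.floordiv n d) else a) (d + 1)
  else if d * d = n then a + d else a
termination_by (n - d).toNat
decreasing_by
  have _h2 : 0 ≤ d * (d - 1) := by
    rcases (by omega : d ≤ 0 ∨ 1 ≤ d) with _h' | _h' <;> nlinarith
  have _h3 : d < n := by nlinarith
  omega

def aliquot (n : Int) : Int := aliquotLoop n 1 2

-- ===== PORT B =====
-- B's inner while loop: strip the factor p off m, collecting the powers p^1..p^k.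
-- (the 0 < m / 2 <= p conjuncts only make the recursion total; they hold at every call site)
theorem pvInnerDec (p m : Int) (h1 : 0 < m) (h2 : 2 ≤ p) :
    (PySem.Int.floordiv m p).toNat < m.toNat := by
  rw [PySem.Int.floordiv_eq_ediv_of_pos (by omega : (0:Int) < p)]
  have h3 : m / p < m := Int.ediv_lt_self_of_pos_of_ne_one h1 (by omega)
  have h4 : 0 ≤ m / p := Int.ediv_nonneg (by omega) (by omega)
  omega

def innerLoop (p m pk : Int) (powers : List Int) : Int × Int × List Int :=
  if h : PySem.Int.mod m p = 0 ∧ 0 < m ∧ 2 ≤ p then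
    innerLoop p (PySem.Int.floordiv m p) (pk * p) (powers ++ [pk])
  else (m, pk, powers)
termination_by m.toNat
decreasing_by exact pvInnerDec p m h.2.1 h.2.2

-- the inner loop never grows m (needed for the outer loop's termination)
theorem innerLoop_fst_le (p m pk : Int) (powers : List Int) :
    (innerLoop p m pk powers).1 ≤ m := by
  rw [innerLoop.eq_def]
  by_cases h : PySem.Int.mod m p = 0 ∧ 0 < m ∧ 2 ≤ p
  · rw [dif_pos h]
    have hrec := innerLoop_fst_le p (PySem.Int.floordiv m p) (pk * p) (powers ++ [pk])
    have hfd : PySem.Int.floordiv m p = m / p :=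
      PySem.Int.floordiv_eq_ediv_of_pos (by omega : (0:Int) < p)
    have hle : m / p ≤ m := Int.ediv_le_self p (by omega)
    omega
  · rw [dif_neg h]
termination_by m.toNat
decreasing_by exact pvInnerDec p m h.2.1 h.2.2

theorem pvOuterDec1 (m p m' : Int) (hg : p * p ≤ m) (hle : m' ≤ m) :
    (m' + 1 - (p + 1)).toNat < (m + 1 - p).toNat := by
  have h2 : p ≤ p * p := by nlinarith [mul_self_nonneg (p - 1)]
  omega

-- B's outer while loop: extend the divisor list by the products with each power of p.
def outerLoop (m p : Int) (divs : List Int) : Int × List Int :=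
  if h : p * p ≤ m then
    if PySem.Int.mod m p = 0 then
      outerLoop (innerLoop p m p []).1 (p + 1)
        (divs ++ divs.flatMap (fun d => (innerLoop p m p []).2.2.map (fun q => d * q)))
    else outerLoop m (p + 1) divs
  else (m, divs)
termination_by (m + 1 - p).toNat
decreasing_by
  · exact pvOuterDec1 m p _ h (innerLoop_fst_le p m p [])
  · exact pvOuterDec1 m p m h (le_refl m)

def aliquot_alt (n : Int) : Int :=
  1 + ((if 1 < (outerLoop n 2 [1]).1 then
      (outerLoop n 2 [1]).2 ++ (outerLoop n 2 [1]).2.map (fun d => d * (outerLoop n 2 [1]).1)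
    else (outerLoop n 2 [1]).2).filter
      (fun d => decide (2 ≤ d ∧ d ≤ PySem.Int.floordiv n 2))).sum

-- ===== PRECONDITION & SPEC =====
def Spec_aliquot (n : Int) (out : Int) : Prop := out = aliquot_alt n
instance (n : Int) (out : Int) : Decidable (Spec_aliquot n out) := by unfold Spec_aliquot; infer_instance

-- ===== CLAIM (what is proved, stated in full; the proofs are below) =====
def Claim_equal_aliquot : Prop := ∀ (n : Int), Dom_aliquot n → Spec_aliquot n (aliquot n)

-- ===== LEMMAS AND PROOFS =====

-- the divisor/cofactor pair sum A's loop still has to accumulate from divisor d on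
noncomputable def pairSum (n d : Int) : Int :=
  ∑ k ∈ Finset.Ico d (n + 1), if k * k < n ∧ PySem.Int.mod n k = 0 then k + PySem.Int.floordiv n k else 0

-- the square correction A's loop still has to add from divisor d on
noncomputable def sqSum (n d : Int) : Int :=
  ∑ r ∈ Finset.Ico d (n + 1), if r * r = n then r else 0

-- the small divisors (d*d ≤ n) of n at or above d, and with their cofactors
noncomputable def divsSmall (n d : Int) : Finset Int :=
  (Finset.Ico d (n + 1)).filter (fun k => k * k ≤ n ∧ k ∣ n)

noncomputable def divsFound (n d : Int) : Finset Int :=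
  divsSmall n d ∪ (divsSmall n d).image (fun k => PySem.Int.floordiv n k)

lemma ico_bot_sum (f : Int → Int) (a b : Int) (h : a < b) :
    ∑ k ∈ Finset.Ico a b, f k = f a + ∑ k ∈ Finset.Ico (a + 1) b, f k := by
  rw [← Finset.insert_Ico_add_one_left_eq_Ico h, Finset.sum_insert (by simp)]

-- loop invariant of A's while loop
lemma loop_inv (n a d : Int) (hd : 2 ≤ d) :
    aliquotLoop n a d = a + pairSum n d + sqSum n d := by
  rw [aliquotLoop.eq_def]
  by_cases h : d * d < n
  · have hdn : d < n := by
      have h2 : 0 ≤ d * (d - 1) := by nlinarith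
      nlinarith
    simp only [h, dite_true]
    rw [loop_inv n _ (d + 1) (by omega)]
    have hp : pairSum n d
        = (if d * d < n ∧ PySem.Int.mod n d = 0 then d + PySem.Int.floordiv n d else 0)
          + pairSum n (d + 1) := by
      rw [pairSum, pairSum]; exact ico_bot_sum _ d (n + 1) (by omega)
    have hs : sqSum n d = (if d * d = n then d else 0) + sqSum n (d + 1) := by
      rw [sqSum, sqSum]; exact ico_bot_sum _ d (n + 1) (by omega)
    have hne : d * d ≠ n := ne_of_lt h
    rw [hp, hs, if_neg hne]
    by_cases hmd : PySem.Int.mod n d = 0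
    · rw [if_pos hmd, if_pos (And.intro h hmd)]; ring
    · rw [if_neg hmd, if_neg (fun hc => hmd hc.2)]; ring
  · simp only [h, dite_false]
    have hpz : pairSum n d = 0 := by
      apply Finset.sum_eq_zero
      intro k hk
      rw [Finset.mem_Ico] at hk
      have : ¬ k * k < n := by nlinarith [mul_le_mul hk.1 hk.1 (by omega) (by omega)]
      simp [this]
    by_cases hsq : d * d = n
    · have hsz : sqSum n d = d := by
        rw [sqSum]
        rw [Finset.sum_eq_single_of_mem d (by rw [Finset.mem_Ico]; constructor <;> nlinarith)]
        · simp [hsq]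
        · intro r hr hrd
          rw [Finset.mem_Ico] at hr
          have hr1 : d + 1 ≤ r := by omega
          have : ¬ r * r = n := by nlinarith [mul_le_mul hr1 hr1 (by omega) (by omega)]
          simp [this]
      simp [hsq, hpz, hsz]
    · have hsz : sqSum n d = 0 := by
        apply Finset.sum_eq_zero
        intro r hr
        rw [Finset.mem_Ico] at hr
        have : ¬ r * r = n := by
          rcases (by omega : r = d ∨ d + 1 ≤ r) with h' | h'
          · rw [h']; exact hsq
          · nlinarith [mul_le_mul h' h' (by omega) (by omega)]
        simp [this]
      simp [hsq, hpz, hsz]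
termination_by (n - d).toNat
decreasing_by
  have _h2 : 0 ≤ d * (d - 1) := by
    rcases (by omega : d ≤ 0 ∨ 1 ≤ d) with _h' | _h' <;> nlinarith
  have _h3 : d < n := by nlinarith
  omega

-- facts about a divisor d ≥ 2 of n > 0 and its cofactor n / d
lemma cofactor_facts (n d : Int) (hn : 0 < n) (hd : 2 ≤ d) (hdvd : d ∣ n) :
    d * (n / d) = n ∧ 0 < n / d ∧ (n / d) ∣ n ∧ n / (n / d) = d := by
  have hmul : d * (n / d) = n := Int.mul_ediv_cancel' hdvd
  have hepos : 0 < n / d := by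
    rcases le_or_gt (n / d) 0 with h' | h'
    · nlinarith [mul_nonpos_of_nonneg_of_nonpos (by omega : (0:Int) ≤ d) h']
    · exact h'
  refine ⟨hmul, hepos, ⟨d, by linarith [mul_comm d (n / d)]⟩, ?_⟩
  have hn' : n = (n / d) * d := by linarith [mul_comm d (n / d)]
  calc n / (n / d) = (n / d) * d / (n / d) := by rw [← hn']
    _ = d := Int.mul_ediv_cancel_left _ (ne_of_gt hepos)

-- the sum of the found divisors is A's pair sum plus its square correction
lemma found_sum (n : Int) : ∑ x ∈ divsFound n 2, x = pairSum n 2 + sqSum n 2 := by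
  set K : Finset Int := (Finset.Ico 2 (n + 1)).filter (fun k => k * k < n ∧ k ∣ n) with hK
  set E : Finset Int := (Finset.Ico 2 (n + 1)).filter (fun r => r * r = n) with hE
  have memK : ∀ k, k ∈ K ↔ (2 ≤ k ∧ k < n + 1) ∧ k * k < n ∧ k ∣ n := by
    intro k; rw [hK, Finset.mem_filter, Finset.mem_Ico]
  have memE : ∀ r, r ∈ E ↔ (2 ≤ r ∧ r < n + 1) ∧ r * r = n := by
    intro r; rw [hE, Finset.mem_filter, Finset.mem_Ico]
  have hP : divsSmall n 2 = K ∪ E := by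
    rw [divsSmall, hK, hE]
    ext k
    simp only [Finset.mem_union, Finset.mem_filter, Finset.mem_Ico]
    constructor
    · rintro ⟨hk, hle, hdvd⟩
      rcases lt_or_eq_of_le hle with h' | h'
      · exact Or.inl ⟨hk, h', hdvd⟩
      · exact Or.inr ⟨hk, h'⟩
    · rintro (⟨hk, hlt, hdvd⟩ | ⟨hk, heq⟩)
      · exact ⟨hk, le_of_lt hlt, hdvd⟩
      · exact ⟨hk, le_of_eq heq, ⟨k, heq.symm⟩⟩
  have hEim : E.image (fun k => PySem.Int.floordiv n k) = E := by
    have him : ∀ r ∈ E, PySem.Int.floordiv n r = r := by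
      intro r hr
      rw [memE] at hr
      rw [PySem.Int.floordiv_eq_ediv_of_pos (by omega : (0:Int) < r), ← hr.2,
        Int.mul_ediv_cancel_left _ (by omega : r ≠ (0:Int))]
    calc E.image (fun k => PySem.Int.floordiv n k) = E.image id := Finset.image_congr him
      _ = E := Finset.image_id
  have hKim : K.image (fun k => PySem.Int.floordiv n k) = K.image (fun k => n / k) := by
    apply Finset.image_congr
    intro k hk
    rw [Finset.mem_coe, memK] at hk
    exact PySem.Int.floordiv_eq_ediv_of_pos (by omega)
  have hKfacts : ∀ k ∈ K, k * (n / k) = n ∧ 0 < n / k ∧ 0 < n := by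
    intro k hk
    rw [memK] at hk
    have hn0 : (0:Int) < n := by nlinarith [hk.2.1, hk.1.1]
    obtain ⟨hmul, hepos, -, -⟩ := cofactor_facts n k hn0 hk.1.1 hk.2.2
    exact ⟨hmul, hepos, hn0⟩
  have hinj : ∀ x ∈ K, ∀ y ∈ K, n / x = n / y → x = y := by
    intro x hx y hy hxy
    obtain ⟨hx1, hx2, -⟩ := hKfacts x hx
    obtain ⟨hy1, hy2, -⟩ := hKfacts y hy
    rw [hxy] at hx1
    exact mul_right_cancel₀ (ne_of_gt hy2) (hx1.trans hy1.symm)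
  have him : ∑ d ∈ K.image (fun k => n / k), d = ∑ k ∈ K, n / k :=
    Finset.sum_image hinj
  have hd1 : Disjoint K (K.image (fun k => n / k)) := by
    rw [Finset.disjoint_left]
    intro x hxK hxI
    rw [Finset.mem_image] at hxI
    obtain ⟨k, hk, hkx⟩ := hxI
    obtain ⟨hkm, hke, -⟩ := hKfacts k hk
    rw [memK] at hxK hk
    subst hkx
    nlinarith [hxK.2.1, hk.2.1, hk.1.1]
  have hd2 : Disjoint (K ∪ K.image (fun k => n / k)) E := by
    rw [Finset.disjoint_left]
    intro x hxU hxE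
    rw [Finset.mem_union] at hxU
    rw [memE] at hxE
    rcases hxU with hxK | hxI
    · rw [memK] at hxK; omega
    · rw [Finset.mem_image] at hxI
      obtain ⟨k, hk, hkx⟩ := hxI
      obtain ⟨hkm, hke, -⟩ := hKfacts k hk
      rw [memK] at hk
      subst hkx
      nlinarith [hxE.2, hk.2.1]
  have hcov : divsFound n 2 = (K ∪ K.image (fun k => n / k)) ∪ E := by
    rw [divsFound, hP, Finset.image_union, hEim, hKim]
    ext x
    simp only [Finset.mem_union]
    tauto
  have hpair : pairSum n 2 = ∑ k ∈ K, (k + n / k) := by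
    rw [pairSum, hK, Finset.sum_filter]
    apply Finset.sum_congr rfl
    intro k hk
    rw [Finset.mem_Ico] at hk
    simp only [PySem.Int.mod_eq_zero_iff_dvd,
      PySem.Int.floordiv_eq_ediv_of_pos (show (0:Int) < k by omega)]
  have hsq : sqSum n 2 = ∑ r ∈ E, r := by
    rw [sqSum, hE, Finset.sum_filter]
  rw [hcov, Finset.sum_union hd2, Finset.sum_union hd1, him, hpair, hsq,
    Finset.sum_add_distrib]

-- the divisors A's pairing finds are exactly the divisors in [2, n//2]
lemma found_eq (n : Int) :
    divsFound n 2 = (Finset.Ico 2 (n / 2 + 1)).filter (fun k => PySem.Int.mod n k = 0) := by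
  ext k
  rw [divsFound, Finset.mem_union, Finset.mem_filter, Finset.mem_Ico]
  constructor
  · rintro (hk | hk)
    · rw [divsSmall, Finset.mem_filter, Finset.mem_Ico] at hk
      obtain ⟨⟨h2k, -⟩, hkk, hdvd⟩ := hk
      have h2kn : 2 * k ≤ n := by nlinarith
      have hk2 : k ≤ n / 2 := by
        rw [Int.le_ediv_iff_mul_le (by omega : (0:Int) < 2)]; omega
      exact ⟨⟨h2k, by omega⟩, (PySem.Int.mod_eq_zero_iff_dvd n k).mpr hdvd⟩
    · rw [Finset.mem_image] at hk
      obtain ⟨j, hj, hjk⟩ := hk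
      rw [divsSmall, Finset.mem_filter, Finset.mem_Ico] at hj
      obtain ⟨⟨h2j, -⟩, hjj, hdvd⟩ := hj
      have hn0 : (0:Int) < n := by nlinarith
      obtain ⟨hmul, hepos, hcdvd, -⟩ := cofactor_facts n j hn0 h2j hdvd
      rw [PySem.Int.floordiv_eq_ediv_of_pos (by omega : (0:Int) < j)] at hjk
      subst hjk
      have hge : j ≤ n / j := by nlinarith
      have h2c : 2 ≤ n / j := by omega
      have h2cn : 2 * (n / j) ≤ n := by nlinarith
      have hle : n / j ≤ n / 2 := by
        rw [Int.le_ediv_iff_mul_le (by omega : (0:Int) < 2)]; omega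
      exact ⟨⟨h2c, by omega⟩, (PySem.Int.mod_eq_zero_iff_dvd n _).mpr hcdvd⟩
  · rintro ⟨⟨h2k, hkb⟩, hmod⟩
    have hdvd : k ∣ n := (PySem.Int.mod_eq_zero_iff_dvd n k).mp hmod
    have h2kn : 2 * k ≤ n := by
      have : k ≤ n / 2 := by omega
      have := (Int.le_ediv_iff_mul_le (by omega : (0:Int) < 2)).mp this
      omega
    have hn0 : (0:Int) < n := by omega
    by_cases hkk : k * k ≤ n
    · exact Or.inl (by
        rw [divsSmall, Finset.mem_filter, Finset.mem_Ico]
        exact ⟨⟨h2k, by omega⟩, hkk, hdvd⟩)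
    · obtain ⟨hmul, hepos, hcdvd, hback⟩ := cofactor_facts n k hn0 h2k hdvd
      set m := n / k with hm
      have hmk : m < k := by nlinarith
      have hmm : m * m ≤ n := by nlinarith
      have h2m : 2 ≤ m := by nlinarith
      refine Or.inr ?_
      rw [Finset.mem_image]
      refine ⟨m, ?_, ?_⟩
      · rw [divsSmall, Finset.mem_filter, Finset.mem_Ico]
        exact ⟨⟨h2m, by nlinarith⟩, hmm, hcdvd⟩
      · rw [PySem.Int.floordiv_eq_ediv_of_pos (by omega : (0:Int) < m)]
        exact hback
  
-- the positive divisors of c, as a finset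
noncomputable def divFin (c : Int) : Finset Int :=
  (Finset.Ico 1 (c + 1)).filter (fun k => PySem.Int.mod c k = 0)

lemma mem_divFin (c k : Int) (hc : 0 < c) : k ∈ divFin c ↔ 0 < k ∧ k ∣ c := by
  rw [divFin, Finset.mem_filter, Finset.mem_Ico]
  constructor
  · rintro ⟨⟨h1, -⟩, hmod⟩
    exact ⟨by omega, (PySem.Int.mod_eq_zero_iff_dvd c k).mp hmod⟩
  · rintro ⟨hk, hdvd⟩
    exact ⟨⟨by omega, by have := Int.le_of_dvd hc hdvd; omega⟩,
      (PySem.Int.mod_eq_zero_iff_dvd c k).mpr hdvd⟩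

-- an integer ≥ 2 with no divisor in [2, itself) is prime
lemma prime_of_no_small_divisor (m : Int) (hm : 2 ≤ m)
    (h : ∀ q, 2 ≤ q → q ∣ m → q = m) : Prime m := by
  rw [Int.prime_iff_natAbs_prime]
  rw [Nat.prime_def_lt']
  have habs : (m.natAbs : Int) = m := Int.natAbs_of_nonneg (by omega)
  constructor
  · omega
  · intro a ha2 halt hadvd
    have hdvd : (a : Int) ∣ m := by
      rw [← habs]; exact_mod_cast hadvd
    have := h a (by exact_mod_cast ha2) hdvd
    omega

-- distinctness of d * p^i representations with p ∤ d
lemma pow_mul_inj (p d d' : Int) (i j : ℕ) (hp : 2 ≤ p)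
    (hd : ¬ p ∣ d) (hd' : ¬ p ∣ d') (h : d * p ^ i = d' * p ^ j) :
    i = j ∧ d = d' := by
  have hp0 : p ≠ 0 := by omega
  have key : ∀ (a b : Int) (u v : ℕ), ¬ p ∣ a → ¬ p ∣ b → u ≤ v →
      a * p ^ u = b * p ^ v → u = v ∧ a = b := by
    intro a b u v hu hv huv heq
    have hcancel : a = b * p ^ (v - u) := by
      have : a * p ^ u = b * p ^ (v - u) * p ^ u := by
        rw [mul_assoc, ← pow_add]
        have : v - u + u = v := by omega
        rw [this, heq]
      exact mul_right_cancel₀ (pow_ne_zero u hp0) this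
    rcases Nat.eq_or_lt_of_le huv with h' | h'
    · refine ⟨h', ?_⟩
      rw [hcancel, h', Nat.sub_self, pow_zero, mul_one]
    · exfalso
      apply hu
      rw [hcancel]
      have : v - u = (v - u - 1) + 1 := by omega
      rw [this, pow_succ]
      exact ⟨b * p ^ (v - u - 1), by ring⟩
  rcases le_total i j with hle | hle
  · exact key d d' i j hd hd' hle h
  · obtain ⟨h1, h2⟩ := key d' d j i hd' hd hle h.symm
    exact ⟨h1.symm, h2.symm⟩

-- the positive divisors of c * p^k, for p prime not dividing c
lemma dvd_mul_pow_iff (c p : Int) (k : ℕ) (hc : 0 < c) (hp2 : 2 ≤ p)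
    (hpp : Prime p) (hpc : ¬ p ∣ c) (e : Int) :
    (0 < e ∧ e ∣ c * p ^ k) ↔ ∃ (d : Int) (i : ℕ), 0 < d ∧ d ∣ c ∧ i ≤ k ∧ e = d * p ^ i := by
  induction k generalizing e with
  | zero =>
    simp only [pow_zero, mul_one]
    constructor
    · rintro ⟨he, hdvd⟩
      exact ⟨e, 0, he, hdvd, le_refl 0, by simp⟩
    · rintro ⟨d, i, hd, hdc, hi, rfl⟩
      have : i = 0 := by omega
      subst this
      simp only [pow_zero, mul_one]
      exact ⟨hd, hdc⟩
  | succ k ih =>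
    constructor
    · rintro ⟨he, hdvd⟩
      by_cases hpe : p ∣ e
      · obtain ⟨e', rfl⟩ := hpe
        have he' : e' ∣ c * p ^ k := by
          have h1 : c * p ^ (k + 1) = p * (c * p ^ k) := by ring
          rw [h1] at hdvd
          exact (mul_dvd_mul_iff_left (show p ≠ 0 by omega)).mp hdvd
        have he'0 : 0 < e' := by nlinarith
        obtain ⟨d, i, hd, hdc, hik, rfl⟩ := (ih e').mp ⟨he'0, he'⟩
        exact ⟨d, i + 1, hd, hdc, by omega, by ring⟩
      · have hcop : IsCoprime p e := hpp.coprime_iff_not_dvd.mpr hpe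
        have : e ∣ c := (hcop.symm.pow_right).dvd_of_dvd_mul_right hdvd
        exact ⟨e, 0, he, this, by omega, by simp⟩
    · rintro ⟨d, i, hd, hdc, hik, rfl⟩
      constructor
      · positivity
      · exact mul_dvd_mul hdc (pow_dvd_pow p hik)

-- characterization of B's inner loop
lemma inner_spec (p m pk : Int) (powers : List Int) (hp : 2 ≤ p) (hm : 0 < m) :
    ∃ (k : ℕ) (m' : Int),
      innerLoop p m pk powers
        = (m', pk * p ^ k, powers ++ (List.range k).map (fun i => pk * p ^ i))
      ∧ m = p ^ k * m' ∧ 0 < m' ∧ ¬ p ∣ m' := by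
  rw [innerLoop.eq_def]
  by_cases hmod : PySem.Int.mod m p = 0
  · rw [dif_pos ⟨hmod, hm, hp⟩]
    have hdvd := (PySem.Int.mod_eq_zero_iff_dvd m p).mp hmod
    have hmp : p * (m / p) = m := Int.mul_ediv_cancel' hdvd
    have hfd : PySem.Int.floordiv m p = m / p :=
      PySem.Int.floordiv_eq_ediv_of_pos (by omega : (0:Int) < p)
    have h0 : 0 < m / p := by
      rcases le_or_gt (m / p) 0 with h' | h'
      · nlinarith
      · exact h'
    obtain ⟨k, m', heq, hfac, hm', hnd⟩ :=
      inner_spec p (PySem.Int.floordiv m p) (pk * p) (powers ++ [pk]) hp (by omega)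
    refine ⟨k + 1, m', ?_, ?_, hm', hnd⟩
    · rw [heq]
      refine Prod.ext rfl (Prod.ext ?_ ?_)
      · show pk * p * p ^ k = pk * p ^ (k + 1); ring
      · show powers ++ [pk] ++ (List.range k).map (fun i => pk * p * p ^ i)
            = powers ++ (List.range (k + 1)).map (fun i => pk * p ^ i)
        rw [List.append_assoc]
        congr 1
        rw [List.range_succ_eq_map, List.map_cons, List.map_map]
        simp only [pow_zero, mul_one, List.singleton_append, List.cons.injEq, true_and]
        apply List.map_congr_left
        intro i _
        show pk * p * p ^ i = pk * p ^ (i + 1)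
        ring
    · rw [hfd] at hfac
      rw [← hmp, hfac]; ring
  · rw [dif_neg (by intro hcon; exact hmod hcon.1)]
    refine ⟨0, m, ?_, by ring, hm, ?_⟩
    · simp
    · intro hcon
      exact hmod ((PySem.Int.mod_eq_zero_iff_dvd m p).mpr hcon)
termination_by m.toNat
decreasing_by
  have hdvd := (PySem.Int.mod_eq_zero_iff_dvd m p).mp hmod
  have hmp : p * (m / p) = m := Int.mul_ediv_cancel' hdvd
  rw [PySem.Int.floordiv_eq_ediv_of_pos (by omega : (0:Int) < p)]
  have h0 : 0 < m / p := by
    rcases le_or_gt (m / p) 0 with h' | h'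
    · nlinarith
    · exact h'
  have hlt : m / p < m := by nlinarith
  omega

-- invariant of B's outer loop: divs lists exactly the positive divisors of the
-- smooth part c already extracted; the loop returns the divisor list of the full c₁
lemma outer_inv (m p c : Int) (divs : List Int)
    (hm : 0 < m) (hp : 2 ≤ p) (hc : 0 < c)
    (hsmall : ∀ q, 2 ≤ q → q < p → ¬ q ∣ m)
    (hclt : ∀ q, Prime q → 0 < q → q ∣ c → q < p)
    (hnd : divs.Nodup) (hset : divs.toFinset = divFin c) :
    ∃ c₁, 0 < c₁ ∧
      c₁ * (outerLoop m p divs).1 = c * m ∧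
      0 < (outerLoop m p divs).1 ∧
      (outerLoop m p divs).2.Nodup ∧
      (outerLoop m p divs).2.toFinset = divFin c₁ ∧
      (∀ q, 2 ≤ q → q ∣ (outerLoop m p divs).1 → q = (outerLoop m p divs).1) ∧
      (1 < (outerLoop m p divs).1 → ¬ (outerLoop m p divs).1 ∣ c₁) := by
  rw [outerLoop.eq_def]
  by_cases hg : p * p ≤ m
  · by_cases hmod : PySem.Int.mod m p = 0
    · rw [dif_pos hg, if_pos hmod]
      have hdvd := (PySem.Int.mod_eq_zero_iff_dvd m p).mp hmod
      -- p is prime: m has no divisor in [2, p), and p divides m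
      have hppr : Prime p := by
        rw [Int.prime_iff_natAbs_prime, Nat.prime_def_lt']
        have habs : (p.natAbs : Int) = p := Int.natAbs_of_nonneg (by omega)
        refine ⟨by omega, ?_⟩
        intro a ha2 halt hadvd
        have hadvd' : (a : Int) ∣ p := by rw [← habs]; exact_mod_cast hadvd
        exact hsmall a (by exact_mod_cast ha2) (by omega) (hadvd'.trans hdvd)
      have hpc : ¬ p ∣ c := fun hcon =>
        absurd (hclt p hppr (by omega) hcon) (lt_irrefl p)
      obtain ⟨k, m', heq, hfac, hm', hndvd⟩ := inner_spec p m p [] hp hm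
      have hm'le : m' ∣ m := ⟨p ^ k, by rw [hfac]; ring⟩
      -- the collected powers are p^1, …, p^k
      have hpows : (innerLoop p m p []).2.2 = (List.range k).map (fun i => p ^ (i + 1)) := by
        rw [heq]
        show ([] : List Int) ++ (List.range k).map (fun i => p * p ^ i)
            = (List.range k).map (fun i => p ^ (i + 1))
        rw [List.nil_append]
        apply List.map_congr_left
        intro i _
        ring
      have hm1 : (innerLoop p m p []).1 = m' := by rw [heq]
      -- facts about members of divs
      have hmem : ∀ d ∈ divs, 0 < d ∧ d ∣ c ∧ ¬ p ∣ d := by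
        intro d hd
        have : d ∈ divFin c := by rw [← hset]; exact List.mem_toFinset.mpr hd
        obtain ⟨h1, h2⟩ := (mem_divFin c d hc).mp this
        exact ⟨h1, h2, fun hcon => hpc (hcon.trans h2)⟩
      -- the extended list
      set L' := divs ++ divs.flatMap
        (fun d => (innerLoop p m p []).2.2.map (fun q => d * q)) with hL'
      have hk1 : 1 ≤ k := by
        rcases Nat.eq_zero_or_pos k with h0 | h0
        · subst h0
          simp only [pow_zero, one_mul] at hfac
          exact absurd (hfac ▸ hdvd) hndvd
        · omega
      have hL'nd : L'.Nodup := by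
        rw [hL']
        apply List.Nodup.append hnd
        · rw [List.nodup_flatMap]
          constructor
          · intro d hd
            obtain ⟨hd0, hdc, hdp⟩ := hmem d hd
            rw [hpows, List.map_map]
            apply List.Nodup.map_on _ (List.nodup_range)
            intro i _ j _ hij
            have := pow_mul_inj p d d (i + 1) (j + 1) hp hdp hdp hij
            omega
          · apply List.Pairwise.imp_of_mem _ hnd
            intro d d' hd hd' hne
            obtain ⟨hd0, hdc, hdp⟩ := hmem d hd
            obtain ⟨hd'0, hd'c, hd'p⟩ := hmem d' hd'
            rw [Function.onFun, List.disjoint_left]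
            intro x hx hx'
            rw [hpows, List.map_map, List.mem_map] at hx hx'
            obtain ⟨i, -, rfl⟩ := hx
            obtain ⟨j, -, hxx⟩ := hx'
            exact hne (pow_mul_inj p d' d (j + 1) (i + 1) hp hd'p hdp hxx).2.symm
        · rw [List.disjoint_left]
          intro x hx hx'
          obtain ⟨hx0, hxc, hxp⟩ := hmem x hx
          rw [List.mem_flatMap] at hx'
          obtain ⟨d, hd, hx'⟩ := hx'
          rw [hpows, List.map_map, List.mem_map] at hx'
          obtain ⟨i, -, rfl⟩ := hx'
          exact hxp ⟨d * p ^ i, by simp only [Function.comp_apply]; ring⟩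
      have hL'set : L'.toFinset = divFin (c * p ^ k) := by
        ext x
        rw [hL', List.toFinset_append, Finset.mem_union, List.mem_toFinset,
          List.mem_toFinset, mem_divFin _ _ (by positivity), List.mem_flatMap]
        constructor
        · rintro (hx | ⟨d, hd, hx⟩)
          · have := (mem_divFin c x hc).mp (by rw [← hset]; exact List.mem_toFinset.mpr hx)
            refine ⟨this.1, this.2.trans ⟨p ^ k, rfl⟩⟩
          · rw [hpows, List.map_map, List.mem_map] at hx
            obtain ⟨i, hi, rfl⟩ := hx
            rw [List.mem_range] at hi
            obtain ⟨hd0, hdc, -⟩ := hmem d hd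
            exact (dvd_mul_pow_iff c p k hc hp hppr hpc _).mpr
              ⟨d, i + 1, hd0, hdc, by omega, rfl⟩
        · intro hx
          obtain ⟨d, i, hd0, hdc, hik, rfl⟩ :=
            (dvd_mul_pow_iff c p k hc hp hppr hpc _).mp hx
          rcases Nat.eq_zero_or_pos i with h0 | h0
          · subst h0
            left
            rw [← List.mem_toFinset, hset, mem_divFin c _ hc]
            simp only [pow_zero, mul_one]
            exact ⟨hd0, hdc⟩
          · right
            refine ⟨d, ?_, ?_⟩
            · rw [← List.mem_toFinset, hset, mem_divFin c d hc]; exact ⟨hd0, hdc⟩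
            · rw [hpows, List.map_map, List.mem_map]
              refine ⟨i - 1, by rw [List.mem_range]; omega, ?_⟩
              simp only [Function.comp_apply]
              have hi' : i - 1 + 1 = i := by omega
              rw [hi']
      -- apply the induction hypothesis at (m', p+1, c*p^k, L')
      have hres := outer_inv (innerLoop p m p []).1 (p + 1) (c * p ^ k) L'
        (by rw [hm1]; exact hm') (by omega) (by positivity)
        (by
          rw [hm1]
          intro q hq2 hqp hqm'
          rcases lt_or_eq_of_le (by omega : q ≤ p) with h' | h'
          · exact hsmall q hq2 h' (hqm'.trans hm'le)
          · subst h'; exact hndvd hqm')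
        (by
          intro q hqpr hq0 hqdvd
          rcases hqpr.dvd_mul.mp hqdvd with h' | h'
          · have := hclt q hqpr hq0 h'; omega
          · have hqp : q ∣ p := hqpr.dvd_of_dvd_pow h'
            have := Int.le_of_dvd (by omega) hqp
            omega)
        hL'nd hL'set
      have hcm : c * m = c * p ^ k * (innerLoop p m p []).1 := by
        rw [hm1, hfac]; ring
      rw [hcm]
      exact hres
    · rw [dif_pos hg, if_neg hmod]
      exact outer_inv m (p + 1) c divs hm (by omega) hc
        (by
          intro q hq2 hqp hqm
          rcases lt_or_eq_of_le (by omega : q ≤ p) with h' | h'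
          · exact hsmall q hq2 h' hqm
          · exact hmod ((PySem.Int.mod_eq_zero_iff_dvd m p).mpr (h' ▸ hqm)))
        (by intro q hqpr hq0 hqc; have := hclt q hqpr hq0 hqc; omega)
        hnd hset
  · rw [dif_neg hg]
    refine ⟨c, hc, rfl, hm, hnd, hset, ?_, ?_⟩
    · -- only divisor of m in [2, ∞) is m itself
      show ∀ q, 2 ≤ q → q ∣ m → q = m
      intro q hq2 hqm
      have hqp : p ≤ q := by
        by_contra hcon
        exact hsmall q hq2 (by omega) hqm
      obtain ⟨t, ht⟩ := hqm
      have ht0 : 0 < t := by nlinarith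
      rcases (by omega : t = 1 ∨ 2 ≤ t) with h1 | h2
      · rw [ht, h1, mul_one]
      · exfalso
        have htm : t ∣ m := ⟨q, by rw [ht]; ring⟩
        have htp : p ≤ t := by
          by_contra hcon
          exact hsmall t h2 (by omega) htm
        nlinarith
    · show 1 < m → ¬ m ∣ c
      intro hm2 hmc
      -- m is then its own smallest divisor ≥ 2, so m < p by hclt — contradiction
      have hpr : Prime m := prime_of_no_small_divisor m (by omega) (by
        intro q hq2 hqm
        have hqp : p ≤ q := by
          by_contra hcon
          exact hsmall q hq2 (by omega) hqm
        obtain ⟨t, ht⟩ := hqm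
        have ht0 : 0 < t := by nlinarith
        rcases (by omega : t = 1 ∨ 2 ≤ t) with h1 | h2
        · rw [ht, h1, mul_one]
        · exfalso
          have htm : t ∣ m := ⟨q, by rw [ht]; ring⟩
          have htp : p ≤ t := by
            by_contra hcon
            exact hsmall t h2 (by omega) htm
          nlinarith)
      have := hclt m hpr (by omega) hmc
      exact hsmall m (by omega) (by omega) dvd_rfl
termination_by (m + 1 - p).toNat
decreasing_by
  · have h1 := innerLoop_fst_le p m p []
    have h2 : p ≤ p * p := by nlinarith [mul_self_nonneg (p - 1)]
    omega
  · have h2 : p ≤ p * p := by nlinarith [mul_self_nonneg (p - 1)]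
    omega

-- B's result, as the sum over the divisors of n in [2, n/2]
lemma alt_eq_sum (n : Int) :
    aliquot_alt n
      = 1 + ∑ x ∈ (Finset.Ico 2 (n / 2 + 1)).filter (fun k => PySem.Int.mod n k = 0), x := by
  have hfd : PySem.Int.floordiv n 2 = n / 2 :=
    PySem.Int.floordiv_eq_ediv_of_pos (by omega : (0:Int) < 2)
  rcases le_or_gt n 1 with hn | hn
  · -- degenerate inputs: the loop never runs and the divisor list stays [1]
    have hout : outerLoop n 2 [1] = (n, [1]) := by
      rw [outerLoop.eq_def, dif_neg (by omega : ¬ (2:Int) * 2 ≤ n)]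
    have hempty : Finset.Ico 2 (n / 2 + 1) = ∅ := Finset.Ico_eq_empty (by omega)
    rw [aliquot_alt, hout, hempty]
    have h1 : ¬ (1 : Int) < (n, [(1:Int)]).1 := by simp; omega
    rw [if_neg h1]
    simp [hfd]
  · -- n ≥ 2: the loop computes the full divisor list
    have hset1 : [(1:Int)].toFinset = divFin 1 := by
      ext x
      rw [List.mem_toFinset, List.mem_singleton, mem_divFin 1 x (by omega)]
      constructor
      · rintro rfl; exact ⟨by omega, dvd_rfl⟩
      · rintro ⟨h1, h2⟩; exact Int.eq_one_of_dvd_one (by omega) h2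
    obtain ⟨c₁, hc₁, hprod, hm₁pos, hndiv, hsetdiv, hqfact, hnotdvd⟩ :=
      outer_inv n 2 1 [1] (by omega) (by omega) (by omega)
        (by intro q hq2 hqp; omega)
        (by intro q hqpr hq0 hqdvd; exact absurd (isUnit_of_dvd_one hqdvd) hqpr.not_unit)
        (by simp) hset1
    set m₁ := (outerLoop n 2 [1]).1 with hm₁
    set divs := (outerLoop n 2 [1]).2 with hdivs
    rw [one_mul] at hprod
    -- the final list after the trailing prime factor is appended
    have hfinal : (if 1 < m₁ then divs ++ divs.map (fun d => d * m₁) else divs).Nodup ∧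
        (if 1 < m₁ then divs ++ divs.map (fun d => d * m₁) else divs).toFinset = divFin n := by
      by_cases h1 : 1 < m₁
      · rw [if_pos h1]
        have hm₁2 : 2 ≤ m₁ := by omega
        have hpr : Prime m₁ := prime_of_no_small_divisor m₁ hm₁2 hqfact
        have hmc : ¬ m₁ ∣ c₁ := hnotdvd h1
        have hmemd : ∀ d ∈ divs, 0 < d ∧ d ∣ c₁ := by
          intro d hd
          exact (mem_divFin c₁ d hc₁).mp (by rw [← hsetdiv]; exact List.mem_toFinset.mpr hd)
        constructor
        · apply List.Nodup.append hndiv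
          · exact hndiv.map (mul_left_injective₀ (by omega : m₁ ≠ 0))
          · rw [List.disjoint_left]
            intro x hx hx'
            obtain ⟨hx0, hxc⟩ := hmemd x hx
            rw [List.mem_map] at hx'
            obtain ⟨d, hd, rfl⟩ := hx'
            exact hmc (dvd_trans ⟨d, mul_comm d m₁⟩ hxc)
        · ext x
          simp only [List.toFinset_append, Finset.mem_union, List.mem_toFinset, List.mem_map]
          have hmem' : ∀ y : Int, y ∈ divs ↔ 0 < y ∧ y ∣ c₁ := fun y => by
            rw [← List.mem_toFinset, hsetdiv, mem_divFin c₁ y hc₁]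
          rw [mem_divFin _ _ (by omega : (0:Int) < n)]
          simp only [hmem']
          have hiff := dvd_mul_pow_iff c₁ m₁ 1 hc₁ hm₁2 hpr hmc x
          rw [pow_one] at hiff
          constructor
          · rintro (⟨hx0, hxc⟩ | ⟨d, ⟨hd0, hdc⟩, rfl⟩)
            · exact ⟨hx0, by rw [← hprod]; exact hxc.trans ⟨m₁, rfl⟩⟩
            · refine ⟨by positivity, ?_⟩
              rw [← hprod]
              exact mul_dvd_mul hdc dvd_rfl
          · intro hx
            rw [← hprod] at hx
            obtain ⟨d, i, hd0, hdc, hi1, rfl⟩ := hiff.mp hx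
            rcases (by omega : i = 0 ∨ i = 1) with h0 | h0
            · subst h0
              left
              simp only [pow_zero, mul_one]
              exact ⟨hd0, hdc⟩
            · subst h0
              right
              exact ⟨d, ⟨hd0, hdc⟩, by rw [pow_one]⟩
      · rw [if_neg h1]
        have : m₁ = 1 := by omega
        rw [this, mul_one] at hprod
        rw [hprod] at hsetdiv
        exact ⟨hndiv, hsetdiv⟩
    obtain ⟨hLnd, hLset⟩ := hfinal
    set L := if 1 < m₁ then divs ++ divs.map (fun d => d * m₁) else divs with hL
    rw [aliquot_alt]
    have hLok : (if 1 < (outerLoop n 2 [1]).1 then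
        (outerLoop n 2 [1]).2 ++ (outerLoop n 2 [1]).2.map (fun d => d * (outerLoop n 2 [1]).1)
      else (outerLoop n 2 [1]).2) = L := rfl
    rw [hLok]
    congr 1
    -- list-filter sum = finset-filter sum
    have hfnd : (L.filter (fun d => decide (2 ≤ d ∧ d ≤ PySem.Int.floordiv n 2))).Nodup :=
      hLnd.filter _
    have hsum : ∑ x ∈ (L.filter
        (fun d => decide (2 ≤ d ∧ d ≤ PySem.Int.floordiv n 2))).toFinset, x
        = (L.filter (fun d => decide (2 ≤ d ∧ d ≤ PySem.Int.floordiv n 2))).sum := by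
      rw [List.sum_toFinset _ hfnd]; simp
    rw [← hsum, List.toFinset_filter, hLset]
    -- the two filtered finsets coincide
    congr 1
    ext x
    rw [Finset.mem_filter, Finset.mem_filter, Finset.mem_Ico, divFin,
      Finset.mem_filter, Finset.mem_Ico, hfd]
    simp only [decide_eq_true_eq]
    constructor
    · rintro ⟨⟨⟨hx1, hxn⟩, hmod⟩, hx2, hxhalf⟩
      exact ⟨⟨hx2, by omega⟩, hmod⟩
    · rintro ⟨⟨hx2, hxhalf⟩, hmod⟩
      exact ⟨⟨⟨by omega, by omega⟩, hmod⟩, hx2, by omega⟩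

-- ===== VERDICT (by name: the statement is the Claim_ definition above) =====
theorem aliquot_spec : Claim_equal_aliquot := by
  intro n _
  unfold Spec_aliquot
  rw [aliquot, loop_inv n 1 2 (by omega), alt_eq_sum, ← found_eq, found_sum]
  ring
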